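-- pv_equiv track=rewrite | github.com/BrooksLabUCSC/flair | bin/ssCorrect.py | juncsToBed12
-- ===== SOURCE A (Python) =====
-- def juncsToBed12(start, end, coords):
--     '''
--     Take alignment start, end, and junction coords and convert to block/size bed12 format.
--     start = integer
--     end = integer
--     coords = list formatted like so [(j1_left,j1_right),(j2_left,j2_right)]
--     '''
--     novelFlag = False
--     sizes, starts = [],[]
--     # initial start is 0
--     if len(coords) > 0:
--         for num,junc in enumerate(coords,0):
--             ss1, ss2, novel1, novel2 = junc
--             if novel1 or novel2: novelFlag = True
--             if num == 0:
--                 st = 0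
--                 size = abs(start-ss1)
--             else:
--                 st = coords[num-1][1] - start
--                 size =  ss1 - (st + start)
--             starts.append(st)
--             sizes.append(size)
--         st = coords[-1][1] - start
--         size =  end - (st + start)
--         starts.append(st)
--         sizes.append(size)
--         return len(starts), sizes, starts, novelFlag
--     else:
--         return 1, [end-start], [0], novelFlag
-- ===== SOURCE B (Python) =====
-- def _chunk2(xs):
--     # pair up a flat list two elements at a time
--     pairs = []
--     i = 0
--     while i + 1 < len(xs):
--         pairs.append((xs[i], xs[i + 1]))
--         i += 2
--     return pairs
--
-- def juncsToBed12(start, end, coords):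
--     # Flatten all coordinates into one boundary list and chunk it into
--     # (block_start, block_end) pairs; blocks fall out of the pairing.
--     if not coords:
--         return 1, [end - start], [0], False
--     bounds = [start]
--     for l, r, _n1, _n2 in coords:
--         bounds += (l, r)
--     bounds.append(end)
--     pairs = _chunk2(bounds)
--     starts = [a - start for a, _b in pairs]
--     sizes = [abs(pairs[0][1] - pairs[0][0])] + [b - a for a, b in pairs[1:]]
--     novel = False
--     for _l, _r, n1, n2 in coords:
--         if n1 or n2:
--             novel = True
--     return len(starts), sizes, starts, novel
-- ===== Notes on version B (the rewrite author's own statement) =====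
-- stated objective: alternative
-- what changed: Replaces A's fused enumerate loop with coords[num-1]/coords[-1] back-references by a different data representation: all coordinates are flattened into one boundary list [start,l1,r1,...,ln,rn,end], a recursive helper chunks it into (block_start,block_end) pairs, and starts/sizes are read off the pairs (first size via abs as in the BED12 convention A uses).
import Mathlib
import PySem

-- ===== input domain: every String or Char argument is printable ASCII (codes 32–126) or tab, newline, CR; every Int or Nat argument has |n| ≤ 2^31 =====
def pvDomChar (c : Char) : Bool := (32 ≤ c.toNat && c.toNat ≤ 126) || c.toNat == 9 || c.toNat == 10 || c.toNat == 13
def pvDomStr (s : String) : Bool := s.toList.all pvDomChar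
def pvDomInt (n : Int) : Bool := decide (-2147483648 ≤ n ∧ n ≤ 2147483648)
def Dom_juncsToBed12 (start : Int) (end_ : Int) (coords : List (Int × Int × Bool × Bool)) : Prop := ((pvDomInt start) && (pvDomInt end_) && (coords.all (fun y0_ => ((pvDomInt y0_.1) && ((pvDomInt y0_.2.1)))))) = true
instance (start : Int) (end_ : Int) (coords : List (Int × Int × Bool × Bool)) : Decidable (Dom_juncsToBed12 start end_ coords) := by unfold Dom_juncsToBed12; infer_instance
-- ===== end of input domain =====

-- B replaces A's fused back-referencing loop by a flattened boundary list chunked into pairs (alternative representation; same cost).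

-- ===== PORT A =====
-- the 'for num,junc in enumerate(coords,0)' loop, state (novelFlag, sizes, starts)
def jLoopA (start : Int) (coords : List (Int × Int × Bool × Bool)) :
    List (Int × (Int × Int × Bool × Bool)) → Bool → List Int → List Int → Bool × List Int × List Int
  | [], novel, sizes, starts => (novel, sizes, starts)
  | (num, junc) :: rest, novel, sizes, starts =>
    let novel := if junc.2.2.1 || junc.2.2.2 then true else novel
    if num == 0 then
      jLoopA start coords rest novel (sizes ++ [|start - junc.1|]) (starts ++ [(0 : Int)])
    else
      -- coords[num-1]: in range whenever num ≥ 1 along the enumerate loop, so getD is never hit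
      let st := ((PySem.List.pyGet? coords (num - 1)).getD (0, 0, false, false)).2.1 - start
      jLoopA start coords rest novel (sizes ++ [junc.1 - (st + start)]) (starts ++ [st])

def juncsToBed12 (start : Int) (end_ : Int) (coords : List (Int × Int × Bool × Bool)) : Int × List Int × List Int × Bool :=
  let novelFlag := false
  if coords.length > 0 then
    let r := jLoopA start coords (PySem.List.enumerate coords 0) novelFlag [] []
    -- coords[-1][1]
    let st := ((PySem.List.pyGet? coords (-1)).getD (0, 0, false, false)).2.1 - start
    let sizes := r.2.1 ++ [end_ - (st + start)]
    let starts := r.2.2 ++ [st]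
    ((starts.length : Int), sizes, starts, r.1)
  else
    ((1 : Int), [end_ - start], [(0 : Int)], novelFlag)

-- ===== PORT B =====
-- _chunk2: walk the flat list pairing two elements at a time
def jChunk2 : List Int → List (Int × Int)
  | a :: b :: rest => (a, b) :: jChunk2 rest
  | _ => []

def juncsToBed12_alt (start : Int) (end_ : Int) (coords : List (Int × Int × Bool × Bool)) : Int × List Int × List Int × Bool :=
  match coords with
  | [] => ((1 : Int), [end_ - start], [(0 : Int)], false)
  | _ :: _ =>
    let bounds := (coords.foldl (fun acc c => acc ++ [c.1, c.2.1]) [start]) ++ [end_]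
    let pairs := jChunk2 bounds
    let starts := pairs.map (fun p => p.1 - start)
    -- pairs[0]: pairs is nonempty here since coords is nonempty
    let p0 := pairs.headD (0, 0)
    let sizes := |p0.2 - p0.1| :: (pairs.drop 1).map (fun p => p.2 - p.1)
    let novel := coords.foldl (fun nv c => if c.2.2.1 || c.2.2.2 then true else nv) false
    ((starts.length : Int), sizes, starts, novel)

-- ===== PRECONDITION & SPEC =====
def Spec_juncsToBed12 (start : Int) (end_ : Int) (coords : List (Int × Int × Bool × Bool)) (out : Int × List Int × List Int × Bool) : Prop := out = juncsToBed12_alt start end_ coords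
instance (start : Int) (end_ : Int) (coords : List (Int × Int × Bool × Bool)) (out : Int × List Int × List Int × Bool) : Decidable (Spec_juncsToBed12 start end_ coords out) := by unfold Spec_juncsToBed12; infer_instance

-- ===== CLAIM (what is proved, stated in full; the proofs are below) =====
def Claim_equal_juncsToBed12 : Prop := ∀ (start : Int) (end_ : Int) (coords : List (Int × Int × Bool × Bool)), Dom_juncsToBed12 start end_ coords → Spec_juncsToBed12 start end_ coords (juncsToBed12 start end_ coords)

-- ===== LEMMAS AND PROOFS =====

-- A's loop from counter m+1 on, with rest = coords.drop (m+1) and prev = coords[m]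
theorem jLoopA_chain (start : Int) (coords : List (Int × Int × Bool × Bool)) :
    ∀ (rest : List (Int × Int × Bool × Bool)) (m : Nat) (prev : Int × Int × Bool × Bool)
      (novel : Bool) (sizes starts : List Int),
      coords.drop m = prev :: rest →
      jLoopA start coords (PySem.List.enumerate rest ((m : Int) + 1)) novel sizes starts =
        (novel || rest.any (fun c => c.2.2.1 || c.2.2.2),
         sizes ++ ((prev :: rest).zip rest).map (fun pq => pq.2.1 - pq.1.2.1),
         starts ++ ((prev :: rest).zip rest).map (fun pq => pq.1.2.1 - start)) := by
  intro rest
  induction rest with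
  | nil =>
      intro m prev novel sizes starts _
      simp [PySem.List.enumerate, jLoopA]
  | cons cur rest' ih =>
      intro m prev novel sizes starts h
      have hprev : coords[m]? = some prev := by
        have : (coords.drop m)[0]? = some prev := by rw [h]; rfl
        simpa using this
      have hne : (((m : Int) + 1) == 0) = false := by
        rw [beq_eq_false_iff_ne]; omega
      have hdrop : coords.drop (m + 1) = cur :: rest' := by
        have := congrArg List.tail h
        simpa [List.tail_drop] using this
      rw [PySem.List.enumerate_cons]
      simp only [jLoopA, hne]
      have hidx : ((m : Int) + 1) - 1 = (m : Int) := by omega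
      rw [hidx, PySem.List.pyGet?_natCast, hprev]
      have hrec := ih (m + 1) cur
        (if cur.2.2.1 || cur.2.2.2 then true else novel)
        (sizes ++ [cur.1 - (prev.2.1 - start + start)])
        (starts ++ [prev.2.1 - start]) hdrop
      have hc : ((m : Int) + 1) + 1 = ((m + 1 : Nat) : Int) + 1 := by push_cast; ring
      simp only [Option.getD_some, Bool.false_eq_true, if_false]
      rw [hc, hrec]
      simp only [List.zip_cons_cons, List.map_cons, List.any_cons, sub_add_cancel,
        List.append_assoc, List.cons_append, List.nil_append, Prod.mk.injEq]
      refine ⟨?_, trivial⟩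
      cases cur.2.2.1 <;> cases cur.2.2.2 <;> cases novel <;> simp

-- B's bounds-building foldl is [start] ++ flattened coordinate pairs
theorem foldl_bounds (f : (Int × Int × Bool × Bool) → List Int) :
    ∀ (cs : List (Int × Int × Bool × Bool)) (acc : List Int),
      cs.foldl (fun a c => a ++ f c) acc = acc ++ cs.flatMap f := by
  intro cs
  induction cs with
  | nil => intro acc; simp
  | cons c cs ih => intro acc; simp [List.foldl_cons, ih, List.flatMap_cons]

-- chunking the flattened boundary list yields consecutive (right, next-left) pairs
theorem chunk2_flat :
    ∀ (rest : List (Int × Int × Bool × Bool)) (c0 : Int × Int × Bool × Bool) (x e : Int),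
      jChunk2 (x :: (c0 :: rest).flatMap (fun c => [c.1, c.2.1]) ++ [e]) =
        (x, c0.1) :: (((c0 :: rest).zip rest).map (fun pq => (pq.1.2.1, pq.2.1))
          ++ [(((c0 :: rest).getLastD (0, 0, false, false)).2.1, e)]) := by
  intro rest
  induction rest with
  | nil => intro c0 x e; simp [jChunk2]
  | cons c1 r ih =>
      intro c0 x e
      have h := ih c1 c0.2.1 e
      simp only [List.flatMap_cons, List.cons_append, List.nil_append] at h ⊢
      rw [jChunk2, h]
      simp [List.getLastD_eq_getLast?]

-- B's novel foldl equals an any over coords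
theorem foldl_novel :
    ∀ (cs : List (Int × Int × Bool × Bool)) (nv : Bool),
      cs.foldl (fun nv c => if c.2.2.1 || c.2.2.2 then true else nv) nv
        = (nv || cs.any (fun c => c.2.2.1 || c.2.2.2)) := by
  intro cs
  induction cs with
  | nil => intro nv; simp
  | cons c cs ih =>
      intro nv
      rw [List.foldl_cons, ih, List.any_cons]
      cases c.2.2.1 <;> cases c.2.2.2 <;> cases nv <;> simp

theorem juncsToBed12_spec : Claim_equal_juncsToBed12 := by
  intro start end_ coords _
  unfold Spec_juncsToBed12
  cases coords with
  | nil => rfl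
  | cons c0 rest =>
    -- A side
    have hchain := jLoopA_chain start (c0 :: rest) rest 0 c0
      (if c0.2.2.1 || c0.2.2.2 then true else false)
      [|start - c0.1|] [(0 : Int)] rfl
    have hlast : PySem.List.pyGet? (c0 :: rest) (-1) = some ((c0 :: rest).getLastD (0, 0, false, false)) := by
      rw [PySem.List.pyGet?_neg_one]
      cases h : (c0 :: rest).getLast? with
      | none => simp at h
      | some x => simp [List.getLastD_eq_getLast?, h]
    -- B side
    have hbounds := foldl_bounds (fun c => [c.1, c.2.1]) (c0 :: rest) [start]
    have hchunk := chunk2_flat rest c0 start end_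
    simp only [juncsToBed12, juncsToBed12_alt, List.length_cons, PySem.List.enumerate_cons,
      jLoopA, Nat.cast_zero] at *
    rw [if_pos (by omega)]
    simp only [show ((0 : Int) == 0) = true from rfl, if_true, zero_add, List.nil_append] at *
    rw [hchain, hlast, hbounds]
    simp only [List.cons_append, List.nil_append] at hchunk ⊢
    rw [hchunk]
    simp only [Option.getD_some, List.headD_cons, List.drop_succ_cons, List.drop_zero,
      List.map_cons, List.map_append, List.map_map, List.length_cons, Prod.mk.injEq]
    refine ⟨?_, ?_, ?_, ?_⟩
    · simp
    · rw [abs_sub_comm]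
      simp [Function.comp]
    · simp [Function.comp, sub_self]
    · rw [foldl_novel]
      simp only [List.any_cons]
      cases c0.2.2.1 <;> cases c0.2.2.2 <;> simp
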